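-- pv_equiv track=rewrite | github.com/pyinstaller/pyinstaller | PyInstaller/building/build_main.py | _get_module_collection_mode
-- ===== SOURCE A (Python) =====
-- import enum
--
-- class _ModuleCollectionMode(enum.IntFlag):
--     """
--     Module collection mode flags.
--     """
--     PYZ = enum.auto()  # Collect byte-compiled .pyc into PYZ archive
--     PYC = enum.auto()  # Collect byte-compiled .pyc as external data file
--     PY = enum.auto()  # Collect source .py file as external data file
--
-- _MODULE_COLLECTION_MODES = {
--     "pyz": _ModuleCollectionMode.PYZ,
--     "pyc": _ModuleCollectionMode.PYC,
--     "py": _ModuleCollectionMode.PY,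
--     "pyz+py": _ModuleCollectionMode.PYZ | _ModuleCollectionMode.PY,
--     "py+pyz": _ModuleCollectionMode.PYZ | _ModuleCollectionMode.PY,
-- }
--
-- def _get_module_collection_mode(mode_dict, name, noarchive=False):
--     """
--     Determine the module/package collection mode for the given module name, based on the provided collection
--     mode settings dictionary.
--     """
--     # Default mode: collect into PYZ, unless noarchive is enabled. In that case, collect as pyc.
--     mode_flags = _ModuleCollectionMode.PYC if noarchive else _ModuleCollectionMode.PYZ
--
--     # If we have no collection mode settings, end here and now.
--     if not mode_dict:
--         return mode_flags
--
--     # Search the parent modules/packages in top-down fashion, and take the last given setting. This ensures that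
--     # a setting given for the top-level package is recursively propagated to all its subpackages and submodules,
--     # but also allows individual sub-modules to override the setting again.
--     mode = 'pyz'
--
--     name_parts = name.split('.')
--     for i in range(len(name_parts)):
--         modlevel = ".".join(name_parts[:i + 1])
--         modlevel_mode = mode_dict.get(modlevel, None)
--         if modlevel_mode is not None:
--             mode = modlevel_mode
--
--     # Convert mode string to _ModuleCollectionMode flags
--     try:
--         mode_flags = _MODULE_COLLECTION_MODES[mode]
--     except KeyError:
--         raise ValueError(f"Unknown module collection mode for {name!r}: {mode!r}!")
--
--     # noarchive flag being set means that we need to change _ModuleCollectionMode.PYZ into _ModuleCollectionMode.PYC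
--     if noarchive and _ModuleCollectionMode.PYZ in mode_flags:
--         mode_flags ^= _ModuleCollectionMode.PYZ
--         mode_flags |= _ModuleCollectionMode.PYC
--
--     return mode_flags
-- ===== SOURCE B (Python) =====
-- import enum
--
-- class _ModuleCollectionMode(enum.IntFlag):
--     PYZ = enum.auto()
--     PYC = enum.auto()
--     PY = enum.auto()
--
-- _MODULE_COLLECTION_MODES = {
--     "pyz": _ModuleCollectionMode.PYZ,
--     "pyc": _ModuleCollectionMode.PYC,
--     "py": _ModuleCollectionMode.PY,
--     "pyz+py": _ModuleCollectionMode.PYZ | _ModuleCollectionMode.PY,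
--     "py+pyz": _ModuleCollectionMode.PYZ | _ModuleCollectionMode.PY,
-- }
--
-- def _get_module_collection_mode(mode_dict, name, noarchive=False):
--     """Resolve the collection mode by a single pass over the SETTINGS dict itself:
--     each configured key is tested for being a dotted ancestor of `name` (its component
--     list being a prefix of name's component list), and the deepest such key wins."""
--     if not mode_dict:
--         return _ModuleCollectionMode.PYC if noarchive else _ModuleCollectionMode.PYZ
--
--     name_parts = name.split('.')
--     mode = 'pyz'
--     best = 0  # number of components of the deepest applicable setting seen so far
--     for key, value in mode_dict.items():
--         key_parts = key.split('.')
--         if best < len(key_parts) and name_parts[:len(key_parts)] == key_parts: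
--             best = len(key_parts)
--             mode = value
--
--     try:
--         flags = _MODULE_COLLECTION_MODES[mode]
--     except KeyError:
--         raise ValueError(f"Unknown module collection mode for {name!r}: {mode!r}!")
--
--     if noarchive and _ModuleCollectionMode.PYZ in flags:
--         flags ^= _ModuleCollectionMode.PYZ
--         flags |= _ModuleCollectionMode.PYC
--     return flags
-- ===== Notes on version B (the rewrite author's own statement) =====
-- stated objective: alternative
-- what changed: B replaces A's walk over the dotted ancestors of name (building each prefix string and overwriting the mode with the last dict hit) by a single pass over the settings dict itself: each configured key is split once and tested for being a component-prefix of name, and the deepest such key wins; no prefix strings are ever built.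
import Mathlib
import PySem

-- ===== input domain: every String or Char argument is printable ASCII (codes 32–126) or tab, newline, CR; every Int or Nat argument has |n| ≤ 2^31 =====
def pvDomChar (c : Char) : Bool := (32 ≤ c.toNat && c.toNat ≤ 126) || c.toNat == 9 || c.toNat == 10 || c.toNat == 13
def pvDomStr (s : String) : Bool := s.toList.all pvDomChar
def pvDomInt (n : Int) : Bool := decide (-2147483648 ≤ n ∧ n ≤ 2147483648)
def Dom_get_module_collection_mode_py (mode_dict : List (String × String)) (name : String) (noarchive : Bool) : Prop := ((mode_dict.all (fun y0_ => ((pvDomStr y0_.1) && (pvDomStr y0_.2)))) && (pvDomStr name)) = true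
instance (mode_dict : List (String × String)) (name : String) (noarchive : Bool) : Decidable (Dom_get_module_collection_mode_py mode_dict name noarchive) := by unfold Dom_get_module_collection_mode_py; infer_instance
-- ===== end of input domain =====

-- B replaces A's walk over the dotted ancestors of `name` (last match wins) by a single pass over
-- the settings dict itself, keeping the deepest key whose component list is a prefix of name's
-- components; objective: alternative decomposition (same cost, no speed claim).

-- module-level constant _MODULE_COLLECTION_MODES (PYZ=1, PYC=2, PY=4); none = KeyError
def pvModeFlags? (mode : String) : Option Int :=
  if mode = "pyz" then some 1
  else if mode = "pyc" then some 2
  else if mode = "py" then some 4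
  else if mode = "pyz+py" then some 5
  else if mode = "py+pyz" then some 5
  else none

-- ===== PORT A =====
def get_module_collection_mode_py (mode_dict : List (String × String)) (name : String) (noarchive : Bool) : Int :=
  let mode_flags : Int := if noarchive then 2 else 1
  if mode_dict.isEmpty then mode_flags
  else
    let name_parts := (PySem.Str.split? name ".").getD []   -- name.split('.'); sep ≠ "" so never none
    -- for i in range(len(name_parts)): last match wins
    let mode := (List.range name_parts.length).foldl (fun mode i =>
      -- modlevel_mode = mode_dict.get(modlevel, None); if not None, mode = modlevel_mode
      (((PySem.Dict.mk mode_dict).get? (PySem.Str.join "." (name_parts.take (i + 1)))).getD mode)) "pyz"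
    match pvModeFlags? mode with
    | some f =>
        -- noarchive fix-up: PYZ in flags → flags ^= PYZ; flags |= PYC
        if noarchive && (PySem.Int.band f 1 != 0) then PySem.Int.bor (PySem.Int.bxor f 1) 2 else f
    | none => 0   -- Python raises ValueError here; excluded by Pre_

-- ===== PORT B =====
def get_module_collection_mode_py_alt (mode_dict : List (String × String)) (name : String) (noarchive : Bool) : Int :=
  if mode_dict.isEmpty then (if noarchive then 2 else 1)
  else
    let name_parts := (PySem.Str.split? name ".").getD []
    -- one pass over the settings: keep the deepest key that is a dotted ancestor of name
    let st := mode_dict.foldl (fun (st : Nat × String) kv =>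
        let key_parts := (PySem.Str.split? kv.1 ".").getD []
        if st.1 < key_parts.length && name_parts.take key_parts.length == key_parts
        then (key_parts.length, kv.2) else st) (0, "pyz")
    match pvModeFlags? st.2 with
    | some f =>
        if noarchive && (PySem.Int.band f 1 != 0) then PySem.Int.bor (PySem.Int.bxor f 1) 2 else f
    | none => 0   -- Python raises ValueError here too; excluded by Pre_

-- ===== PRECONDITION & SPEC =====
-- Pre_ excludes exactly the inputs on which Python A raises ValueError: those where the governing
-- setting (the one at the deepest configured dotted ancestor of name, i.e. the one no deeper
-- ancestor shadows) is an unknown mode string.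
def Pre_get_module_collection_mode_py (mode_dict : List (String × String)) (name : String) (noarchive : Bool) : Prop :=
  ∀ i ∈ List.range ((PySem.Str.split? name ".").getD []).length,
    (((PySem.Dict.mk mode_dict).get?
        (PySem.Str.join "." (((PySem.Str.split? name ".").getD []).take (i + 1)))).getD "pyz")
      ∈ (["pyz", "pyc", "py", "pyz+py", "py+pyz"] : List String)
    ∨ ∃ j ∈ List.range ((PySem.Str.split? name ".").getD []).length, i < j ∧
        (((PySem.Dict.mk mode_dict).get?
            (PySem.Str.join "." (((PySem.Str.split? name ".").getD []).take (j + 1)))).isSome = true)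
instance (mode_dict : List (String × String)) (name : String) (noarchive : Bool) : Decidable (Pre_get_module_collection_mode_py mode_dict name noarchive) := by unfold Pre_get_module_collection_mode_py; infer_instance

def pvWitness_get_module_collection_mode_py : (List (String × String)) × String × Bool :=
  ([("foo", "py")], "foo.bar", true)

def Spec_get_module_collection_mode_py (mode_dict : List (String × String)) (name : String) (noarchive : Bool) (out : Int) : Prop := out = get_module_collection_mode_py_alt mode_dict name noarchive
instance (mode_dict : List (String × String)) (name : String) (noarchive : Bool) (out : Int) : Decidable (Spec_get_module_collection_mode_py mode_dict name noarchive out) := by unfold Spec_get_module_collection_mode_py; infer_instance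

-- ===== CLAIM (what is proved, stated in full; the proofs are below) =====
def Claim_equal_get_module_collection_mode_py : Prop := ∀ (mode_dict : List (String × String)) (name : String) (noarchive : Bool), Dom_get_module_collection_mode_py mode_dict name noarchive → Pre_get_module_collection_mode_py mode_dict name noarchive → Spec_get_module_collection_mode_py mode_dict name noarchive (get_module_collection_mode_py mode_dict name noarchive)

-- ===== LEMMAS AND PROOFS =====


theorem pv_go_eq (c : Char) : ∀ (l : List Char) (fuel : Nat) (cur : List Char) (acc : List (List Char)),
    l.length < fuel →
    PySem.Chars.splitOn.go [c] fuel l cur acc = acc.reverse ++ List.splitOnP.go (fun x => x == c) l cur := by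
  intro l
  induction l with
  | nil =>
    intro fuel cur acc h
    cases fuel with
    | zero => omega
    | succ f => simp [PySem.Chars.splitOn.go, List.splitOnP.go]
  | cons a t ih =>
    intro fuel cur acc h
    cases fuel with
    | zero => omega
    | succ f =>
      rw [PySem.Chars.splitOn.go]
      by_cases hc : a = c
      · subst hc
        simp only [List.isPrefixOf, beq_self_eq_true, Bool.and_eq_true, true_and, if_true]
        have hd : List.drop ([a] : List Char).length (a :: t) = t := by simp
        rw [hd, ih _ [] _ (by simpa using h)]
        rw [List.splitOnP.go]
        simp
      · have : ([c].isPrefixOf (a :: t)) = false := by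
          simp [List.isPrefixOf]
          exact fun h' => absurd h'.symm hc
        rw [this]
        simp only [Bool.false_eq_true, if_false]
        rw [ih _ (a :: cur) _ (by simpa using h)]
        rw [List.splitOnP.go]
        simp [hc]

theorem pv_splitOn_eq (c : Char) (cs : List Char) :
    PySem.Chars.splitOn cs [c] = List.splitOn c cs := by
  rw [PySem.Chars.splitOn, List.splitOn, List.splitOnP]
  have := pv_go_eq c cs (cs.length + 1) [] [] (by omega)
  simpa using this

theorem pv_go_sepfree (c : Char) : ∀ (l cur : List Char), (∀ a ∈ cur, a ≠ c) →
    ∀ p ∈ List.splitOnP.go (fun x => x == c) l cur, c ∉ p := by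
  intro l
  induction l with
  | nil =>
    intro cur hcur p hp
    rw [List.splitOnP.go] at hp
    simp at hp
    subst hp
    simp only [List.mem_reverse]
    exact fun hc => hcur c hc rfl
  | cons a t ih =>
    intro cur hcur p hp
    rw [List.splitOnP.go] at hp
    by_cases hc : a = c
    · subst hc
      simp only [beq_self_eq_true, if_true, List.mem_cons] at hp
      rcases hp with hp | hp
      · subst hp
        simp only [List.mem_reverse]
        exact fun hc => hcur a hc rfl
      · exact ih [] (by simp) p hp
    · rw [if_neg (by simp [hc])] at hp
      refine ih (a :: cur) ?_ p hp
      intro x hx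
      rcases List.mem_cons.mp hx with h | h
      · subst h; exact hc
      · exact hcur x h

theorem pv_splitOn_sepfree (c : Char) (cs : List Char) : ∀ p ∈ List.splitOn c cs, c ∉ p := by
  rw [List.splitOn, List.splitOnP]
  exact pv_go_sepfree c cs [] (by simp)

-- string level
theorem pv_split_eq (s : String) :
    (PySem.Str.split? s ".").getD [] = (List.splitOn '.' s.toList).map String.ofList := by
  have h1 : (".".toList : List Char) = ['.'] := by decide
  rw [PySem.Str.split?, h1, PySem.Chars.split?]
  simp [pv_splitOn_eq]

theorem pv_join_eq (ls : List String) :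
    PySem.Str.join "." ls = String.ofList (['.'].intercalate (ls.map String.toList)) := by
  have h1 : (".".toList : List Char) = ['.'] := by decide
  rw [PySem.Str.join, h1, PySem.Chars.join]

theorem pv_roundtrip (k : String) :
    PySem.Str.join "." ((PySem.Str.split? k ".").getD []) = k := by
  rw [pv_split_eq, pv_join_eq, List.map_map]
  have : (String.toList ∘ String.ofList) = id := by funext l; simp
  rw [this, List.map_id, List.intercalate_splitOn]
  simp

theorem pv_split_join (ls : List String) (hne : ls ≠ []) (hfree : ∀ p ∈ ls, '.' ∉ p.toList) :
    (PySem.Str.split? (PySem.Str.join "." ls) ".").getD [] = ls := by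
  rw [pv_split_eq, pv_join_eq]
  have htl : (String.ofList (['.'].intercalate (ls.map String.toList))).toList
      = ['.'].intercalate (ls.map String.toList) := by simp
  rw [htl, List.splitOn_intercalate _ _ (by
      intro l hl
      rcases List.mem_map.mp hl with ⟨p, hp, rfl⟩
      exact hfree p hp) (by simpa using hne), List.map_map]
  have : (String.ofList ∘ String.toList) = id := by funext s; simp
  rw [this, List.map_id]

theorem pv_split_ne_nil (s : String) : (PySem.Str.split? s ".").getD [] ≠ [] := by
  rw [pv_split_eq]
  simp [List.splitOn, List.splitOnP_ne_nil]

theorem pv_split_free (s : String) : ∀ p ∈ (PySem.Str.split? s ".").getD [], '.' ∉ p.toList := by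
  rw [pv_split_eq]
  intro p hp
  rcases List.mem_map.mp hp with ⟨q, hq, rfl⟩
  have := pv_splitOn_sepfree '.' s.toList q hq
  simpa using this


def pvKP (k : String) : List String := (PySem.Str.split? k ".").getD []

def pvL (parts : List String) (i : Nat) : String := PySem.Str.join "." (parts.take (i + 1))

def pvF (l : List (String × String)) (parts : List String) (i : Nat) : Option String :=
  (PySem.Dict.mk l).get? (pvL parts i)

def pvStep (name_parts : List String) (st : Nat × String) (kv : String × String) : Nat × String :=
  let key_parts := (PySem.Str.split? kv.1 ".").getD []
  if st.1 < key_parts.length && name_parts.take key_parts.length == key_parts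
  then (key_parts.length, kv.2) else st

theorem pv_get?_eq (l : List (String × String)) (k : String) :
    (PySem.Dict.mk l).get? k = (l.find? (fun q => q.1 == k)).map Prod.snd := rfl

theorem pv_get?_mem {l : List (String × String)} {k v : String}
    (h : (PySem.Dict.mk l).get? k = some v) : (k, v) ∈ l := by
  rw [pv_get?_eq] at h
  rcases Option.map_eq_some_iff.mp h with ⟨q, hq, hv⟩
  have hk : q.1 = k := by simpa using List.find?_some hq
  have := List.mem_of_find?_eq_some hq
  rwa [show q = (k, v) from by cases q; simp_all] at this

theorem pv_get?_skip (done rest : List (String × String)) (k : String)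
    (h : ∀ q ∈ done, q.1 ≠ k) :
    (PySem.Dict.mk (done ++ rest)).get? k = (PySem.Dict.mk rest).get? k := by
  rw [pv_get?_eq, pv_get?_eq, List.find?_append]
  have : done.find? (fun q => q.1 == k) = none := by
    rw [List.find?_eq_none]
    intro q hq
    simpa using h q hq
  rw [this, Option.none_or]

theorem pv_findSome?_none {α β : Type} (f : α → Option β) :
    ∀ (xs : List α), (∀ i ∈ xs, f i = none) → xs.findSome? f = none := by
  intro xs
  induction xs with
  | nil => intro _; rfl
  | cons a t ih =>
    intro h
    rw [List.findSome?_cons, h a (by simp)]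
    exact ih (fun i hi => h i (by simp [hi]))

theorem pv_revmax {β : Type} (f : Nat → Option β) :
    ∀ (n i₀ : Nat) (v : β), i₀ < n → f i₀ = some v → (∀ j, i₀ < j → j < n → f j = none) →
    ((List.range n).reverse.findSome? f) = some v := by
  intro n
  induction n with
  | zero => intro i₀ v h; omega
  | succ m ih =>
    intro i₀ v hlt hv hmax
    rw [List.range_succ, List.reverse_append]
    simp only [List.reverse_cons, List.reverse_nil, List.nil_append, List.singleton_append,
      List.findSome?_cons]
    by_cases hi : i₀ = m
    · subst hi; rw [hv]
    · rw [hmax m (by omega) (by omega)]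
      exact ih i₀ v (by omega) hv (fun j h1 h2 => hmax j h1 (by omega))

theorem pv_lastmatch {α : Type} (f : Nat → Option α) (xs : List Nat) (d : α) :
    xs.foldl (fun m i => (f i).getD m) d = (xs.reverse.findSome? f).getD d := by
  induction xs using List.reverseRecOn with
  | nil => simp
  | append_singleton ys x ih =>
      rw [List.foldl_append, List.reverse_append]
      simp only [List.foldl_cons, List.foldl_nil, List.reverse_cons, List.reverse_nil,
        List.nil_append, List.singleton_append, List.findSome?_cons]
      cases hfx : f x with
      | some v => simp
      | none => simpa using ih

theorem pv_fold_inv (parts : List String) (l : List (String × String)) :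
    ∀ (todo done : List (String × String)) (b : Nat) (m : String),
    l = done ++ todo →
    (b = 0 ∧ m = "pyz" ∨ ∃ i, i < parts.length ∧ b = i + 1 ∧ pvF l parts i = some m) →
    (∀ q ∈ done, parts.take (pvKP q.1).length = pvKP q.1 → (pvKP q.1).length ≤ b) →
    ((todo.foldl (pvStep parts) (b, m)).1 = 0 ∧ (todo.foldl (pvStep parts) (b, m)).2 = "pyz"
       ∨ ∃ i, i < parts.length ∧ (todo.foldl (pvStep parts) (b, m)).1 = i + 1
           ∧ pvF l parts i = some (todo.foldl (pvStep parts) (b, m)).2)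
    ∧ (∀ q ∈ l, parts.take (pvKP q.1).length = pvKP q.1 → (pvKP q.1).length ≤ (todo.foldl (pvStep parts) (b, m)).1) := by
  intro todo
  induction todo with
  | nil =>
    intro done b m hl hinv hdone
    refine ⟨hinv, ?_⟩
    intro q hq hm
    exact hdone q (by simpa [hl] using hq) hm
  | cons p rest ih =>
    intro done b m hl hinv hdone
    rw [List.foldl_cons]
    have hassoc : l = (done ++ [p]) ++ rest := by simpa using hl
    by_cases hcond : b < (pvKP p.1).length ∧ parts.take (pvKP p.1).length = pvKP p.1
    · -- the item updates the state
      have hstep : pvStep parts (b, m) p = ((pvKP p.1).length, p.2) := by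
        have h1 := hcond.1
        have h2 := hcond.2
        simp only [pvKP] at h1 h2
        simp [pvStep, pvKP, h1, h2]
      rw [hstep]
      have hne : pvKP p.1 ≠ [] := pv_split_ne_nil p.1
      have hl1 : 1 ≤ (pvKP p.1).length := by
        cases hkp : pvKP p.1 with
        | nil => exact absurd hkp hne
        | cons x xs => simp
      have hlen : (pvKP p.1).length ≤ parts.length := by
        have := congrArg List.length hcond.2
        simp only [List.length_take] at this
        omega
      refine ih (done ++ [p]) (pvKP p.1).length p.2 hassoc (Or.inr ⟨(pvKP p.1).length - 1, by omega, by omega, ?_⟩) ?_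
      · -- pvF l parts ((pvKP p.1).length - 1) = some p.2
        have hLp : pvL parts ((pvKP p.1).length - 1) = p.1 := by
          rw [pvL, show (pvKP p.1).length - 1 + 1 = (pvKP p.1).length by omega, hcond.2]
          exact pv_roundtrip p.1
        have hnod : ∀ q ∈ done, q.1 ≠ p.1 := by
          intro q hq hqp
          have hq' := hdone q hq
          rw [hqp] at hq'
          have := hq' hcond.2
          omega
        rw [pvF, hLp, hl, pv_get?_skip done (p :: rest) p.1 hnod, pv_get?_eq,
          List.find?_cons_of_pos (by simp)]
        rfl
      · -- bound for the extended done
        intro q hq hm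
        rcases List.mem_append.mp hq with hq | hq
        · have := hdone q hq hm
          omega
        · have : q = p := by simpa using hq
          subst this
          exact le_refl _
    · -- the item does not change the state
      have hstep : pvStep parts (b, m) p = (b, m) := by
        simp only [pvStep]
        rw [if_neg]
        simp only [Bool.and_eq_true, decide_eq_true_eq, beq_iff_eq]
        intro h
        exact hcond ⟨h.1, by simpa [pvKP] using h.2⟩
      rw [hstep]
      refine ih (done ++ [p]) b m hassoc hinv ?_
      intro q hq hm
      rcases List.mem_append.mp hq with hq | hq
      · exact hdone q hq hm
      · have : q = p := by simpa using hq
        subst this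
        by_contra hgt
        exact hcond ⟨by omega, hm⟩


def pvParts (name : String) : List String := (PySem.Str.split? name ".").getD []

theorem pv_mode_eq (mode_dict : List (String × String)) (name : String) :
    (List.range (pvParts name).length).foldl
        (fun mode i => (pvF mode_dict (pvParts name) i).getD mode) "pyz"
      = (mode_dict.foldl (pvStep (pvParts name)) (0, "pyz")).2 := by
  set parts := pvParts name with hpdef
  obtain ⟨hinv1, hinv2⟩ := pv_fold_inv parts mode_dict mode_dict [] 0 "pyz" (by simp)
    (Or.inl ⟨rfl, rfl⟩) (by simp)
  rw [pv_lastmatch]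
  set r := mode_dict.foldl (pvStep parts) (0, "pyz") with hr
  have hkey : ∀ j v, j < parts.length → pvF mode_dict parts j = some v → j + 1 ≤ r.1 := by
    intro j v hj hjv
    have hmem : (pvL parts j, v) ∈ mode_dict := pv_get?_mem hjv
    have hkp : pvKP (pvL parts j) = parts.take (j + 1) := by
      rw [pvL]
      show (PySem.Str.split? (PySem.Str.join "." (parts.take (j + 1))) ".").getD [] = _
      refine pv_split_join _ ?_ ?_
      · intro h
        have := congrArg List.length h
        simp only [List.length_take, List.length_nil] at this
        omega
      · intro p hp
        have hmemp : p ∈ pvParts name := List.mem_of_mem_take hp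
        exact pv_split_free name p hmemp
    have hlen : (pvKP (pvL parts j)).length = j + 1 := by
      rw [hkp, List.length_take]
      omega
    have hb : (pvKP ((pvL parts j, v) : String × String).1).length ≤ r.1 :=
      hinv2 _ hmem (by
        show parts.take (pvKP (pvL parts j)).length = pvKP (pvL parts j)
        rw [hlen, hkp])
    have hb' : (pvKP (pvL parts j)).length ≤ r.1 := hb
    omega
  rcases hinv1 with ⟨h1, h2⟩ | ⟨i, hi, hb, hf⟩
  · have hnone : ∀ j ∈ (List.range parts.length).reverse, pvF mode_dict parts j = none := by
      intro j hj
      cases hfj : pvF mode_dict parts j with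
      | none => rfl
      | some v =>
        have := hkey j v (by simpa using hj) hfj
        omega
    rw [pv_findSome?_none _ _ hnone]
    simp [h2]
  · rw [pv_revmax (pvF mode_dict parts) parts.length i r.2 hi hf ?_]
    · simp
    · intro j hij hjn
      cases hfj : pvF mode_dict parts j with
      | none => rfl
      | some v =>
        have := hkey j v hjn hfj
        omega

-- ===== VERDICT (by name: the statement is the Claim_ definition above) =====
theorem get_module_collection_mode_py_spec : Claim_equal_get_module_collection_mode_py := by
  intro mode_dict name noarchive _ _
  unfold Spec_get_module_collection_mode_py
  unfold get_module_collection_mode_py get_module_collection_mode_py_alt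
  cases h : mode_dict.isEmpty with
  | true => simp
  | false =>
    simp only [Bool.false_eq_true, if_false]
    exact congrArg (fun mode => match pvModeFlags? mode with
      | some f =>
          if noarchive && (PySem.Int.band f 1 != 0) then PySem.Int.bor (PySem.Int.bxor f 1) 2 else f
      | none => 0) (pv_mode_eq mode_dict name)
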